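-- pv_equiv track=rewrite | github.com/YinuoQ/predictability_performance_and_ISC | code/preprocessing/get_action.py | remove_noisy_points
-- ===== SOURCE A (Python) =====
-- import copy
--
-- def remove_noisy_points(data):
--     clean_data = copy.deepcopy(data)
--     # Handle edge cases for very small arrays
--     if len(data) < 3:
--         return data
--     # Iterate through the array, starting from the second element and ending at the second-to-last
--     for i in range(1, len(data) - 1):
--         # If the current element is different from both its neighbors
--         if data[i] != data[i - 1] and data[i] != data[i + 1]:
--             # Replace the current element with the previous one (could also be the next one)
--             clean_data[i] = clean_data[i - 1]
--     clean_data[-1] = clean_data[-2]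
--     return clean_data
-- ===== SOURCE B (Python) =====
-- def remove_noisy_points(data):
--     # Run-length-encoding approach: a noisy point is exactly an element of an
--     # interior run of length 1, and the cascade rule merges such a run into the
--     # run before it.
--     if len(data) < 3:
--         return data
--     # run-length encode: list of (value, count) pairs
--     runs = []
--     cur, cnt = data[0], 1
--     for x in data[1:]:
--         if x == cur:
--             cnt += 1
--         else:
--             runs.append((cur, cnt))
--             cur, cnt = x, 1
--     runs.append((cur, cnt))
--     # merge every interior length-1 run into the run before it
--     merged = []
--     pv, pc = runs[0]
--     for v, c in runs[1:-1]:
--         if c == 1: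
--             pc += 1
--         else:
--             merged.append((pv, pc))
--             pv, pc = v, c
--     merged.append((pv, pc))
--     if len(runs) > 1:
--         merged.append(runs[-1])
--     # decode
--     out = []
--     for v, c in merged:
--         out.extend([v] * c)
--     out[-1] = out[-2]
--     return out
-- ===== Notes on version B (the rewrite author's own statement) =====
-- stated objective: alternative
-- what changed: Replaces the per-index neighbour test on a mutated deep copy by a run-length-encoding pipeline: encode data into (value,count) runs, merge every interior length-1 run into the run before it, and decode back.
import Mathlib
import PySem

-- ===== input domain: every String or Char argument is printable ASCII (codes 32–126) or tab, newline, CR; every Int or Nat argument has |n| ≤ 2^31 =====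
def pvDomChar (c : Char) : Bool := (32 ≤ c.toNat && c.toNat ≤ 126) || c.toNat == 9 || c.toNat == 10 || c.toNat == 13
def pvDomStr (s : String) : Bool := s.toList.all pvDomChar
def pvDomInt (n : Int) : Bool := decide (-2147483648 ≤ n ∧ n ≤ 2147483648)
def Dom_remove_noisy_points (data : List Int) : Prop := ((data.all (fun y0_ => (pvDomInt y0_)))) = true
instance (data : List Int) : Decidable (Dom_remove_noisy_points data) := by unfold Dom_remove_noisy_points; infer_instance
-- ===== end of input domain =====

-- B replaces the per-index neighbour test on a mutated deep copy by a
-- run-length-encoding pipeline: encode into (value,count) runs, merge every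
-- interior length-1 run into the run before it, decode back (alternative
-- decomposition, same O(n) cost).


-- ===== PORT A =====
-- clean_data = deepcopy(data); indices are always in range, so pyGetD/pySetD are exact
def remove_noisy_points (data : List Int) : List Int :=
  let clean_data := data
  if data.length < 3 then data
  else
    let clean :=
      (PySem.List.pyRange 1 ((data.length : Int) - 1) 1).foldl
        (fun clean i =>
          if PySem.List.pyGetD data i 0 ≠ PySem.List.pyGetD data (i - 1) 0 ∧
             PySem.List.pyGetD data i 0 ≠ PySem.List.pyGetD data (i + 1) 0 then
            PySem.List.pySetD clean i (PySem.List.pyGetD clean (i - 1) 0)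
          else clean)
        clean_data
    PySem.List.pySetD clean (-1) (PySem.List.pyGetD clean (-2) 0)

-- ===== PORT B =====
-- run-length encode / merge interior length-1 runs / decode; run counts are
-- Python ints (Int) and are always ≥ 1, so `.toNat` in the decode is exact
def remove_noisy_points_alt (data : List Int) : List Int :=
  if data.length < 3 then data
  else
    -- runs = []; cur, cnt = data[0], 1; for x in data[1:] …; runs.append((cur, cnt))
    let r0 := (data.drop 1).foldl
      (fun (s : List (Int × Int) × Int × Int) x =>
        if x = s.2.1 then (s.1, s.2.1, s.2.2 + 1)
        else (s.1 ++ [(s.2.1, s.2.2)], x, 1))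
      ([], data.headD 0, 1)
    let runs := r0.1 ++ [(r0.2.1, r0.2.2)]
    -- merged = []; pv, pc = runs[0]; for v, c in runs[1:-1] …; merged.append((pv, pc))
    let m0 := ((runs.drop 1).dropLast).foldl
      (fun (s : List (Int × Int) × Int × Int) vc =>
        if vc.2 = 1 then (s.1, s.2.1, s.2.2 + 1)
        else (s.1 ++ [(s.2.1, s.2.2)], vc.1, vc.2))
      ([], (runs.headD (0, 0)).1, (runs.headD (0, 0)).2)
    let merged0 := m0.1 ++ [(m0.2.1, m0.2.2)]
    -- if len(runs) > 1: merged.append(runs[-1])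
    let merged := if 1 < runs.length then merged0 ++ [runs.getLastD (0, 0)] else merged0
    -- out = []; for v, c in merged: out.extend([v] * c)
    let out := merged.foldl (fun acc vc => acc ++ List.replicate vc.2.toNat vc.1) []
    -- out[-1] = out[-2]
    PySem.List.pySetD out (-1) (PySem.List.pyGetD out (-2) 0)

-- ===== PRECONDITION & SPEC =====
def Spec_remove_noisy_points (data : List Int) (out : List Int) : Prop := out = remove_noisy_points_alt data
instance (data : List Int) (out : List Int) : Decidable (Spec_remove_noisy_points data out) := by unfold Spec_remove_noisy_points; infer_instance

-- ===== CLAIM (what is proved, stated in full; the proofs are below) =====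
def Claim_equal_remove_noisy_points : Prop := ∀ (data : List Int), Dom_remove_noisy_points data → Spec_remove_noisy_points data (remove_noisy_points data)

-- ===== LEMMAS AND PROOFS =====

/-- The cleaned values at positions 1 .. n-2: `pvG dprev cprev l` reads the current
element and its successor from `l`, the previous ORIGINAL element is `dprev`,
the previous CLEANED value is `cprev`. -/
def pvG (dprev cprev : Int) : List Int → List Int
  | cur :: next :: rest =>
      let v := if cur ≠ dprev ∧ cur ≠ next then cprev else cur
      v :: pvG cur v (next :: rest)
  | _ => []

theorem pvG_length (dprev cprev : Int) (l : List Int) :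
    (pvG dprev cprev l).length = l.length - 1 := by
  induction l generalizing dprev cprev with
  | nil => simp [pvG]
  | cons x t ih =>
      cases t with
      | nil => simp [pvG]
      | cons y t' => simp [pvG, ih]

theorem pvG_succ (l : List Int) (dprev cprev : Int) (k : Nat) (h : k + 2 < l.length) :
    (pvG dprev cprev l).getD (k + 1) 0 =
      if l.getD (k+1) 0 ≠ l.getD k 0 ∧ l.getD (k+1) 0 ≠ l.getD (k+2) 0 then
        (pvG dprev cprev l).getD k 0
      else l.getD (k+1) 0 := by
  induction k generalizing l dprev cprev with
  | zero =>
      match l, h with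
      | x :: y :: z :: t, _ =>
          simp only [pvG]
          by_cases hc : y ≠ x ∧ y ≠ z <;> simp [hc]
  | succ j ih =>
      match l, h with
      | x :: y :: t, h =>
          have ht : j + 2 < (y :: t).length := by
            simp at h ⊢; omega
          simp only [pvG, List.getD_cons_succ]
          exact ih (y :: t) x _ ht

theorem pvG_formula (a : Int) (rest : List Int) (k : Nat) (hk : k + 1 < rest.length) :
    (pvG a a rest).getD k 0 =
      if rest.getD k 0 ≠ (a :: rest).getD k 0 ∧ rest.getD k 0 ≠ rest.getD (k+1) 0 then
        (a :: pvG a a rest).getD k 0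
      else rest.getD k 0 := by
  cases k with
  | zero =>
      match rest, hk with
      | x :: y :: t, _ => simp [pvG]
  | succ j =>
      rw [pvG_succ rest a a j hk]
      simp

theorem pv_set_append_len {alpha : Type} (xs ys : List alpha) (v : alpha) :
    (xs ++ ys).set xs.length v = xs ++ ys.set 0 v := by
  simp

/-- Invariant of A's index loop after processing indices 1..k. -/
theorem pvA_fold (a : Int) (rest : List Int) (k : Nat) (hk : k + 1 ≤ rest.length) :
    (PySem.List.pyRange 1 (1 + (k : Int)) 1).foldl
      (fun clean i =>
        if PySem.List.pyGetD (a :: rest) i 0 ≠ PySem.List.pyGetD (a :: rest) (i - 1) 0 ∧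
           PySem.List.pyGetD (a :: rest) i 0 ≠ PySem.List.pyGetD (a :: rest) (i + 1) 0 then
          PySem.List.pySetD clean i (PySem.List.pyGetD clean (i - 1) 0)
        else clean)
      (a :: rest)
    = (a :: (pvG a a rest).take k) ++ rest.drop k := by
  induction k with
  | zero =>
      rw [PySem.List.pyRange_one_eq_nil (by omega)]
      simp
  | succ k ih =>
      have hk' : k + 1 ≤ rest.length := by omega
      have hk1 : k + 1 < rest.length := by omega
      set G := pvG a a rest with hGdef
      have hG : G.length = rest.length - 1 := pvG_length a a rest
      have hkG : k < G.length := by omega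
      have hrange : PySem.List.pyRange 1 (1 + ((k+1 : Nat) : Int)) 1
          = PySem.List.pyRange 1 (1 + (k : Int)) 1 ++ [1 + (k : Int)] := by
        rw [show (1 + ((k+1 : Nat) : Int)) = (1 + (k : Int)) + 1 by push_cast; ring]
        exact PySem.List.pyRange_one_succ_right (by omega)
      rw [hrange, List.foldl_append, ih hk']
      simp only [List.foldl_cons, List.foldl_nil]
      rw [show (1 : Int) + (k : Int) - 1 = ((k : Nat) : Int) by omega,
          show (1 : Int) + (k : Int) + 1 = ((k + 2 : Nat) : Int) by push_cast; ring,
          show (1 : Int) + (k : Int) = ((k + 1 : Nat) : Int) by push_cast; ring]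
      simp only [PySem.List.pyGetD_natCast, PySem.List.pySetD_natCast,
        List.getD_cons_succ]
      have hlen : (a :: G.take k).length = k + 1 := by
        simp [List.length_take]; omega
      have hLget : ((a :: G.take k) ++ rest.drop k).getD k 0 = (a :: G).getD k 0 := by
        rw [List.getD_append _ _ _ k (by omega)]
        cases k with
        | zero => simp
        | succ j =>
            rw [List.getD_cons_succ, List.getD_cons_succ,
              List.getD_eq_getElem?_getD, List.getD_eq_getElem?_getD,
              List.getElem?_take_of_lt (Nat.lt_succ_self j)]
      have hk2 : k < rest.length := by omega
      have hdrop : rest.drop k = rest.getD k 0 :: rest.drop (k+1) := by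
        rw [List.drop_eq_getElem_cons hk2, List.getD_eq_getElem rest 0 hk2]
      have htake : G.take (k+1) = G.take k ++ [G.getD k 0] := by
        rw [List.take_add_one, List.getElem?_eq_getElem hkG, List.getD_eq_getElem G 0 hkG]
        simp
      have hform := pvG_formula a rest k hk1
      rw [← hGdef] at hform
      by_cases hc : rest.getD k 0 ≠ (a :: rest).getD k 0 ∧ rest.getD k 0 ≠ rest.getD (k+1) 0
      · rw [if_pos hc, hLget]
        rw [if_pos hc] at hform
        have hset : ((a :: G.take k) ++ rest.drop k).set (k+1) ((a :: G).getD k 0)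
            = (a :: G.take k) ++ ((a :: G).getD k 0 :: rest.drop (k+1)) := by
          rw [hdrop]
          have h2 := pv_set_append_len (a :: G.take k) (rest.getD k 0 :: rest.drop (k+1)) ((a :: G).getD k 0)
          rw [hlen] at h2
          rw [h2]
          simp
        rw [hset, htake, hform]
        simp
      · rw [if_neg hc]
        rw [if_neg hc] at hform
        rw [htake, hdrop, hform]
        simp

/-- A's port reduced to the cleaned middle values plus the untouched last element. -/
theorem pvA_reduce (a : Int) (rest : List Int) (hlen : 2 ≤ rest.length) :
    remove_noisy_points (a :: rest)
      = PySem.List.pySetD ((a :: pvG a a rest) ++ [rest.getD (rest.length - 1) 0]) (-1)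
          (PySem.List.pyGetD ((a :: pvG a a rest) ++ [rest.getD (rest.length - 1) 0]) (-2) 0) := by
  have hsmall : ¬ (a :: rest).length < 3 := by simp; omega
  unfold remove_noisy_points
  simp only [if_neg hsmall]
  set G := pvG a a rest with hGdef
  have hG : G.length = rest.length - 1 := pvG_length a a rest
  set m := rest.length - 1 with hm
  have hbound : ((a :: rest).length : Int) - 1 = 1 + (m : Int) := by
    simp only [List.length_cons]; omega
  rw [hbound, pvA_fold a rest m (by omega)]
  have htakeG : G.take m = G := by rw [← hG]; exact List.take_length
  have hmrest : m < rest.length := by omega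
  have hdropm : rest.drop m = [rest.getD m 0] := by
    rw [List.drop_eq_getElem_cons hmrest, List.drop_of_length_le (by omega),
      List.getD_eq_getElem rest 0 hmrest]
  rw [htakeG, hdropm]

-- ===== B-side machinery: run-length encoding =====

/-- Structural version of B's run-length-encoding loop. -/
def pvRLE (v c : Int) : List Int → List (Int × Int)
  | [] => [(v, c)]
  | x :: t => if x = v then pvRLE v (c + 1) t else (v, c) :: pvRLE x 1 t

/-- Structural version of B's merge loop over the interior runs. -/
def pvMRG (pv pc : Int) : List (Int × Int) → List (Int × Int)
  | [] => [(pv, pc)]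
  | r :: t => if r.2 = 1 then pvMRG pv (pc + 1) t else (pv, pc) :: pvMRG r.1 r.2 t

/-- Structural version of B's decode loop. -/
def pvDecR : List (Int × Int) → List Int
  | [] => []
  | r :: t => List.replicate r.2.toNat r.1 ++ pvDecR t

/-- Well-formed run list: positive counts, adjacent values distinct. -/
def pvWF : List (Int × Int) → Prop
  | [] => True
  | r :: t => 1 ≤ r.2 ∧ (∀ s ∈ t.head?, s.1 ≠ r.1) ∧ pvWF t

/-- Cleaned decode of the runs after the first one (the last run is untouched
and its final element is not produced). -/
def pvCL (p : Int) : List (Int × Int) → List Int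
  | [] => []
  | [r] => if r.2 = 1 then [] else List.replicate (r.2 - 1).toNat r.1
  | r :: s :: t =>
      if r.2 = 1 then p :: pvCL p (s :: t)
      else List.replicate r.2.toNat r.1 ++ pvCL r.1 (s :: t)

/-- Cleaned decode of the interior runs only. -/
def pvCL2 (p : Int) : List (Int × Int) → List Int
  | [] => []
  | r :: t =>
      if r.2 = 1 then p :: pvCL2 p t
      else List.replicate r.2.toNat r.1 ++ pvCL2 r.1 t

/-- What B's merge/decode produce from the run list. -/
def pvOut (runs : List (Int × Int)) : List Int :=
  let merged0 := pvMRG (runs.headD (0, 0)).1 (runs.headD (0, 0)).2 ((runs.drop 1).dropLast)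
  let merged := if 1 < runs.length then merged0 ++ [runs.getLastD (0, 0)] else merged0
  pvDecR merged

theorem pvRLE_fold (l : List Int) (v c : Int) (acc : List (Int × Int)) :
    (l.foldl
      (fun (s : List (Int × Int) × Int × Int) x =>
        if x = s.2.1 then (s.1, s.2.1, s.2.2 + 1)
        else (s.1 ++ [(s.2.1, s.2.2)], x, 1)) (acc, v, c)).1
    ++ [((l.foldl
      (fun (s : List (Int × Int) × Int × Int) x =>
        if x = s.2.1 then (s.1, s.2.1, s.2.2 + 1)
        else (s.1 ++ [(s.2.1, s.2.2)], x, 1)) (acc, v, c)).2.1,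
        (l.foldl
      (fun (s : List (Int × Int) × Int × Int) x =>
        if x = s.2.1 then (s.1, s.2.1, s.2.2 + 1)
        else (s.1 ++ [(s.2.1, s.2.2)], x, 1)) (acc, v, c)).2.2)]
    = acc ++ pvRLE v c l := by
  induction l generalizing v c acc with
  | nil => simp [pvRLE]
  | cons x t ih =>
      by_cases hx : x = v
      · simp only [List.foldl_cons, hx, pvRLE]
        exact ih v (c + 1) acc
      · simp only [List.foldl_cons, pvRLE, if_neg hx]
        rw [ih]
        simp

theorem pvMRG_fold (mid : List (Int × Int)) (pv pc : Int) (acc : List (Int × Int)) :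
    (mid.foldl
      (fun (s : List (Int × Int) × Int × Int) vc =>
        if vc.2 = 1 then (s.1, s.2.1, s.2.2 + 1)
        else (s.1 ++ [(s.2.1, s.2.2)], vc.1, vc.2)) (acc, pv, pc)).1
    ++ [((mid.foldl
      (fun (s : List (Int × Int) × Int × Int) vc =>
        if vc.2 = 1 then (s.1, s.2.1, s.2.2 + 1)
        else (s.1 ++ [(s.2.1, s.2.2)], vc.1, vc.2)) (acc, pv, pc)).2.1,
        (mid.foldl
      (fun (s : List (Int × Int) × Int × Int) vc =>
        if vc.2 = 1 then (s.1, s.2.1, s.2.2 + 1)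
        else (s.1 ++ [(s.2.1, s.2.2)], vc.1, vc.2)) (acc, pv, pc)).2.2)]
    = acc ++ pvMRG pv pc mid := by
  induction mid generalizing pv pc acc with
  | nil => simp [pvMRG]
  | cons r t ih =>
      by_cases hr : r.2 = 1
      · simp only [List.foldl_cons, hr, pvMRG]
        exact ih pv (pc + 1) acc
      · simp only [List.foldl_cons, pvMRG, if_neg hr]
        rw [ih]
        simp

theorem pvDec_fold (rs : List (Int × Int)) (acc : List Int) :
    rs.foldl (fun acc vc => acc ++ List.replicate vc.2.toNat vc.1) acc
    = acc ++ pvDecR rs := by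
  induction rs generalizing acc with
  | nil => simp [pvDecR]
  | cons r t ih => simp [pvDecR, ih]

/-- B's port reduced to `pvOut` of the run-length encoding. -/
theorem pvB_reduce (a : Int) (rest : List Int) (hlen : 2 ≤ rest.length) :
    remove_noisy_points_alt (a :: rest)
      = PySem.List.pySetD (pvOut (pvRLE a 1 rest)) (-1)
          (PySem.List.pyGetD (pvOut (pvRLE a 1 rest)) (-2) 0) := by
  have hsmall : ¬ (a :: rest).length < 3 := by simp; omega
  unfold remove_noisy_points_alt pvOut
  simp only [if_neg hsmall, List.drop_succ_cons, List.drop_zero, List.headD_cons]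
  rw [pvRLE_fold rest a 1 []]
  simp only [List.nil_append]
  rw [pvMRG_fold (((pvRLE a 1 rest).drop 1).dropLast)
      ((pvRLE a 1 rest).headD (0, 0)).1 ((pvRLE a 1 rest).headD (0, 0)).2 []]
  simp only [List.nil_append]
  rw [pvDec_fold]
  simp only [List.nil_append]

theorem pvRLE_headval (l : List Int) (v c : Int) :
    ∃ c' t, pvRLE v c l = (v, c') :: t := by
  induction l generalizing c with
  | nil => exact ⟨c, [], rfl⟩
  | cons x t ih =>
      by_cases hx : x = v
      · simpa [pvRLE, hx] using ih (c + 1)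
      · exact ⟨c, pvRLE x 1 t, by simp [pvRLE, hx]⟩

theorem pvRLE_wf (l : List Int) (v c : Int) (hc : 1 ≤ c) : pvWF (pvRLE v c l) := by
  induction l generalizing v c with
  | nil => exact ⟨hc, by simp, trivial⟩
  | cons x t ih =>
      by_cases hx : x = v
      · simpa [pvRLE, hx] using ih v (c + 1) (by omega)
      · rw [show pvRLE v c (x :: t) = (v, c) :: pvRLE x 1 t by simp [pvRLE, hx]]
        obtain ⟨c', t', ht⟩ := pvRLE_headval t x 1
        refine ⟨hc, ?_, ih x 1 (by omega)⟩
        rw [ht]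
        simp only [List.head?_cons]
        intro s hs
        cases hs
        exact hx

theorem pvWF_counts (rs : List (Int × Int)) (h : pvWF rs) : ∀ r ∈ rs, 1 ≤ r.2 := by
  induction rs with
  | nil => simp
  | cons r t ih =>
      obtain ⟨h1, _, h3⟩ := h
      intro s hs
      rcases List.mem_cons.mp hs with h | h
      · subst h; exact h1
      · exact ih h3 s h

theorem pvDecR_append (xs ys : List (Int × Int)) :
    pvDecR (xs ++ ys) = pvDecR xs ++ pvDecR ys := by
  induction xs with
  | nil => simp [pvDecR]
  | cons r t ih => simp [pvDecR, ih]

theorem pvDecR_pvRLE (l : List Int) (v c : Int) (hc : 1 ≤ c) :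
    pvDecR (pvRLE v c l) = List.replicate c.toNat v ++ l := by
  induction l generalizing v c with
  | nil => simp [pvRLE, pvDecR]
  | cons x t ih =>
      by_cases hx : x = v
      · rw [show pvRLE v c (x :: t) = pvRLE v (c + 1) t by simp [pvRLE, hx],
            ih v (c + 1) (by omega)]
        rw [show (c + 1).toNat = c.toNat + 1 by omega, List.replicate_succ']
        simp [hx]
      · rw [show pvRLE v c (x :: t) = (v, c) :: pvRLE x 1 t by simp [pvRLE, hx]]
        rw [pvDecR, ih x 1 (by omega)]
        simp

theorem pvG_run_mid (v : Int) (k : Nat) (l : List Int) (hl : l ≠ []) :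
    pvG v v (List.replicate k v ++ l) = List.replicate k v ++ pvG v v l := by
  induction k with
  | zero => simp
  | succ k ih =>
      have hne : List.replicate k v ++ l ≠ [] := by
        simp [hl]
      obtain ⟨y, t, hyt⟩ := List.exists_cons_of_ne_nil hne
      rw [List.replicate_succ, List.cons_append, hyt]
      have hstep : pvG v v (v :: y :: t) = v :: pvG v v (y :: t) := by
        simp [pvG]
      rw [hstep, ← hyt, ih]
      simp

theorem pvG_run_end (v : Int) (k : Nat) (hk : 1 ≤ k) :
    pvG v v (List.replicate k v) = List.replicate (k - 1) v := by
  induction k with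
  | zero => omega
  | succ k ih =>
      cases k with
      | zero => simp [pvG]
      | succ j =>
          rw [List.replicate_succ, List.replicate_succ]
          have hstep : pvG v v (v :: v :: List.replicate j v)
              = v :: pvG v v (v :: List.replicate j v) := by
            simp [pvG]
          rw [hstep, show (v :: List.replicate j v) = List.replicate (j + 1) v by
            rw [List.replicate_succ], ih (by omega)]
          simp [List.replicate_succ]

theorem pvDecR_cons_head (r : Int × Int) (t : List (Int × Int)) (h : 1 ≤ r.2) :
    ∃ u, pvDecR (r :: t) = r.1 :: u := by
  have hk : r.2.toNat = (r.2.toNat - 1) + 1 := by omega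
  refine ⟨List.replicate (r.2.toNat - 1) r.1 ++ pvDecR t, ?_⟩
  rw [pvDecR, hk, List.replicate_succ]
  simp

/-- pvG over a well-formed decoded run list computes the cleaned runs. -/
theorem pvG_runs (rs : List (Int × Int)) (d p : Int) (hwf : pvWF rs)
    (hd : ∀ s ∈ rs.head?, s.1 ≠ d) :
    pvG d p (pvDecR rs) = pvCL p rs := by
  induction rs generalizing d p with
  | nil => simp [pvDecR, pvCL, pvG]
  | cons r t ih =>
      obtain ⟨hc, hhead, hwt⟩ := hwf
      have hdv : r.1 ≠ d := hd r (by simp)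
      have hk : 1 ≤ r.2.toNat := by omega
      cases t with
      | nil =>
          by_cases h1 : r.2 = 1
          · rw [show pvDecR [r] = [r.1] by
              simp [pvDecR, h1]]
            simp [pvG, pvCL, h1]
          · have hk2 : 2 ≤ r.2.toNat := by omega
            rw [show pvDecR [r] = List.replicate r.2.toNat r.1 by simp [pvDecR]]
            rw [show r.2.toNat = (r.2.toNat - 2) + 1 + 1 by omega,
                List.replicate_succ, List.replicate_succ]
            have hstep : pvG d p (r.1 :: r.1 :: List.replicate (r.2.toNat - 2) r.1)
                = r.1 :: pvG r.1 r.1 (r.1 :: List.replicate (r.2.toNat - 2) r.1) := by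
              simp [pvG, hdv]
            rw [hstep, show (r.1 :: List.replicate (r.2.toNat - 2) r.1)
                = List.replicate (r.2.toNat - 2 + 1) r.1 by rw [List.replicate_succ],
              pvG_run_end r.1 _ (by omega)]
            rw [show pvCL p [r] = List.replicate (r.2 - 1).toNat r.1 by
              simp [pvCL, h1]]
            rw [show (r.2 - 1).toNat = (r.2.toNat - 2) + 1 by omega,
                List.replicate_succ]
            simp
      | cons s t' =>
          have hs2 : 1 ≤ s.2 := hwt.1
          have hsv : s.1 ≠ r.1 := hhead s (by simp)
          obtain ⟨u, hu⟩ := pvDecR_cons_head s t' hs2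
          have hdne : pvDecR (s :: t') ≠ [] := by rw [hu]; simp
          have hih : pvG r.1 p (pvDecR (s :: t')) = pvCL p (s :: t') := by
            refine ih r.1 p hwt ?_
            simp only [List.head?_cons]
            intro q hq
            cases hq
            exact hsv
          by_cases h1 : r.2 = 1
          · rw [show pvDecR (r :: s :: t') = r.1 :: pvDecR (s :: t') by
              simp [pvDecR, h1]]
            rw [hu]
            have hstep : pvG d p (r.1 :: s.1 :: u) = p :: pvG r.1 p (s.1 :: u) := by
              have hcnd : r.1 ≠ d ∧ r.1 ≠ s.1 := ⟨hdv, fun h => hsv h.symm⟩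
              simp [pvG, hcnd.1, hcnd.2]
            rw [hstep, ← hu, hih]
            simp [pvCL, h1]
          · have hk2 : 2 ≤ r.2.toNat := by omega
            rw [show pvDecR (r :: s :: t')
                = List.replicate r.2.toNat r.1 ++ pvDecR (s :: t') by rw [pvDecR]]
            rw [show r.2.toNat = (r.2.toNat - 2) + 1 + 1 by omega,
                List.replicate_succ, List.replicate_succ, List.cons_append,
                List.cons_append]
            have hstep : ∀ zs, pvG d p (r.1 :: r.1 :: zs) = r.1 :: pvG r.1 r.1 (r.1 :: zs) := by
              intro zs
              simp [pvG, hdv]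
            rw [hstep]
            rw [show (r.1 :: (List.replicate (r.2.toNat - 2) r.1 ++ pvDecR (s :: t')))
                = List.replicate (r.2.toNat - 2 + 1) r.1 ++ pvDecR (s :: t') by
              rw [List.replicate_succ, List.cons_append]]
            rw [pvG_run_mid r.1 _ _ hdne]
            have hih2 : pvG r.1 r.1 (pvDecR (s :: t')) = pvCL r.1 (s :: t') := by
              refine ih r.1 r.1 hwt ?_
              simp only [List.head?_cons]
              intro q hq
              cases hq
              exact hsv
            rw [hih2]
            rw [show pvCL p (r :: s :: t')
                = List.replicate r.2.toNat r.1 ++ pvCL r.1 (s :: t') by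
              simp [pvCL, h1]]
            rw [show r.2.toNat = (r.2.toNat - 2) + 1 + 1 by omega,
                List.replicate_succ, List.replicate_succ]
            rw [List.replicate_succ]
            simp

theorem pvDecR_pvMRG (mid : List (Int × Int)) (pv pc : Int) (hpc : 1 ≤ pc)
    (hwf : ∀ r ∈ mid, 1 ≤ r.2) :
    pvDecR (pvMRG pv pc mid) = List.replicate pc.toNat pv ++ pvCL2 pv mid := by
  induction mid generalizing pv pc with
  | nil => simp [pvMRG, pvDecR, pvCL2]
  | cons r t ih =>
      by_cases hr : r.2 = 1
      · rw [show pvMRG pv pc (r :: t) = pvMRG pv (pc + 1) t by simp [pvMRG, hr],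
            ih pv (pc + 1) (by omega) (fun s hs => hwf s (by simp [hs]))]
        rw [show (pc + 1).toNat = pc.toNat + 1 by omega, List.replicate_succ']
        simp [pvCL2, hr]
      · rw [show pvMRG pv pc (r :: t) = (pv, pc) :: pvMRG r.1 r.2 t by
          simp [pvMRG, hr]]
        rw [pvDecR, ih r.1 r.2 (hwf r (by simp)) (fun s hs => hwf s (by simp [hs]))]
        rw [show pvCL2 pv (r :: t)
            = List.replicate r.2.toNat r.1 ++ pvCL2 r.1 t by simp [pvCL2, hr]]

theorem pvCL_bridge (mid : List (Int × Int)) (lv lc : Int) (p : Int) (hlc : 1 ≤ lc) :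
    pvCL p (mid ++ [(lv, lc)]) ++ [lv] = pvCL2 p mid ++ List.replicate lc.toNat lv := by
  induction mid generalizing p with
  | nil =>
      by_cases h1 : lc = 1
      · simp [pvCL, pvCL2, h1]
      · rw [show pvCL p ([] ++ [(lv, lc)]) = List.replicate (lc - 1).toNat lv by
          simp [pvCL, h1]]
        rw [show lc.toNat = (lc - 1).toNat + 1 by omega, List.replicate_succ']
        simp [pvCL2]
  | cons r t ih =>
      obtain ⟨s, u, hsu⟩ := List.exists_cons_of_ne_nil
        (show t ++ [(lv, lc)] ≠ [] by simp)
      by_cases hr : r.2 = 1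
      · rw [List.cons_append, hsu,
            show pvCL p (r :: s :: u) = p :: pvCL p (s :: u) by simp [pvCL, hr],
            ← hsu]
        rw [show pvCL2 p (r :: t) = p :: pvCL2 p t by simp [pvCL2, hr]]
        simp only [List.cons_append, List.cons.injEq, true_and]
        exact ih p
      · rw [List.cons_append, hsu,
            show pvCL p (r :: s :: u)
              = List.replicate r.2.toNat r.1 ++ pvCL r.1 (s :: u) by simp [pvCL, hr],
            ← hsu]
        rw [show pvCL2 p (r :: t)
            = List.replicate r.2.toNat r.1 ++ pvCL2 r.1 t by simp [pvCL2, hr]]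
        rw [List.append_assoc, List.append_assoc, ih r.1]

theorem pv_last_rep (xs : List Int) (v : Int) (n : Nat) (hn : 1 ≤ n) :
    (xs ++ List.replicate n v).getD ((xs ++ List.replicate n v).length - 1) 0 = v := by
  have hlen : (xs ++ List.replicate n v).length = xs.length + n := by simp
  rw [hlen, List.getD_eq_getElem _ _ (by simp; omega),
    List.getElem_append_right (by omega)]
  simp

/-- The two ports agree on lists of length ≥ 3. -/
theorem pvMain (a : Int) (rest : List Int) (hlen : 2 ≤ rest.length) :
    remove_noisy_points (a :: rest) = remove_noisy_points_alt (a :: rest) := by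
  rw [pvA_reduce a rest hlen, pvB_reduce a rest hlen]
  suffices h : (a :: pvG a a rest) ++ [rest.getD (rest.length - 1) 0]
      = pvOut (pvRLE a 1 rest) by rw [h]
  have hwf : pvWF (pvRLE a 1 rest) := pvRLE_wf rest a 1 (by omega)
  obtain ⟨c1, rs', hruns⟩ := pvRLE_headval rest a 1
  have hdec : pvDecR (pvRLE a 1 rest) = a :: rest := by
    rw [pvDecR_pvRLE rest a 1 (by omega)]
    simp [List.replicate]
  rw [hruns] at hwf hdec ⊢
  obtain ⟨hc1, hhead, hwrs'⟩ := hwf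
  obtain ⟨j0, hj0⟩ : ∃ j0, c1.toNat = j0 + 1 := ⟨c1.toNat - 1, by omega⟩
  have hdec2 : pvDecR ((a, c1) :: rs') = a :: (List.replicate j0 a ++ pvDecR rs') := by
    rw [pvDecR, hj0, List.replicate_succ]
    simp
  have hrest : rest = List.replicate j0 a ++ pvDecR rs' := by
    have h2 : a :: rest = a :: (List.replicate j0 a ++ pvDecR rs') := hdec.symm.trans hdec2
    have h3 := congrArg List.tail h2
    simpa using h3
  rcases List.eq_nil_or_concat rs' with hnil | ⟨mid', lr, hconcat⟩
  · -- single run: the whole list is constant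
    subst hnil
    have hrest' : rest = List.replicate j0 a := by simpa [pvDecR] using hrest
    have hm2 : 2 ≤ j0 := by
      have h := hlen
      rw [hrest'] at h
      simpa using h
    obtain ⟨i, hji⟩ : ∃ i, j0 = i + 1 := ⟨j0 - 1, by omega⟩
    have hout2 : pvOut [(a, c1)] = a :: List.replicate j0 a := by
      simp [pvOut, pvMRG, pvDecR, hj0, List.replicate_succ]
    rw [hout2, hrest', hji]
    have hG2 : pvG a a (List.replicate (i + 1) a) = List.replicate i a := by
      simpa using pvG_run_end a (i + 1) (by omega)
    have hlast : (List.replicate (i + 1) a).getD ((List.replicate (i + 1) a).length - 1) 0 = a := by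
      simpa using pv_last_rep [] a (i + 1) i.succ_pos
    rw [hG2, hlast]
    simp [List.replicate_succ']
  · -- at least two runs
    rw [List.concat_eq_append] at hconcat
    subst hconcat
    have hcounts := pvWF_counts _ hwrs'
    have hlc : 1 ≤ lr.2 := hcounts lr (by simp)
    have hcm : ∀ r ∈ mid', 1 ≤ r.2 := fun r hr => hcounts r (by simp [hr])
    have hdecl : pvDecR (mid' ++ [lr]) = pvDecR mid' ++ List.replicate lr.2.toNat lr.1 := by
      rw [pvDecR_append]
      simp [pvDecR]
    have hdne : pvDecR (mid' ++ [lr]) ≠ [] := by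
      rw [hdecl]
      intro h
      rcases List.append_eq_nil_iff.mp h with ⟨h1, h2⟩
      rw [List.replicate_eq_nil_iff] at h2
      omega
    have hGrest : pvG a a rest = List.replicate j0 a ++ pvCL a (mid' ++ [lr]) := by
      rw [hrest, pvG_run_mid a _ _ hdne, pvG_runs _ a a hwrs' hhead]
    have hlast : rest.getD (rest.length - 1) 0 = lr.1 := by
      rw [hrest, hdecl, ← List.append_assoc]
      exact pv_last_rep _ lr.1 lr.2.toNat (by omega)
    have hout : pvOut ((a, c1) :: (mid' ++ [lr]))
        = (a :: List.replicate j0 a) ++ (pvCL2 a mid' ++ List.replicate lr.2.toNat lr.1) := by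
      unfold pvOut
      simp only [List.headD_cons, List.drop_succ_cons, List.drop_zero, List.dropLast_concat]
      rw [if_pos (by simp only [List.length_cons, List.length_append, List.length_nil]; omega)]
      have hlastd : ((a, c1) :: (mid' ++ [lr])).getLastD (0, 0) = lr := by
        rw [show (a, c1) :: (mid' ++ [lr]) = ((a, c1) :: mid') ++ [lr] by simp]
        exact List.getLastD_concat
      rw [hlastd, pvDecR_append, pvDecR_pvMRG mid' a c1 (by omega) hcm]
      rw [hj0, List.replicate_succ]
      simp [pvDecR]
    rw [hout, hGrest, hlast]
    have hbr := pvCL_bridge mid' lr.1 lr.2 a hlc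
    rw [show ((lr.1 : Int), (lr.2 : Int)) = lr from rfl] at hbr
    simp only [List.cons_append, List.append_assoc]
    rw [hbr]

-- ===== VERDICT (by name: the statement is the Claim_ definition above) =====
theorem remove_noisy_points_spec : Claim_equal_remove_noisy_points := by
  intro data _
  unfold Spec_remove_noisy_points
  by_cases hsmall : data.length < 3
  · unfold remove_noisy_points remove_noisy_points_alt
    simp [hsmall]
  · match data, hsmall with
    | a :: rest, hsmall =>
      exact pvMain a rest (by simp at hsmall; omega)
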